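-- pv_equiv track=rewrite | github.com/muyongKim/Step-By-Step | Programmers/Level 2/KAKAO/Friends4Block.py | solution
-- ===== SOURCE A (Python) =====
-- def checkblock(m, n, b):
--     sameBlock = []
--
--     for i in range(n-1):
--         for j in range(m-1):
--             if b[i][j].isalpha() and b[i][j] == b[i][j+1] and b[i][j] == b[i+1][j] and b[i][j] == b[i+1][j+1]:
--                 sameBlock.append((i,j))
--                 sameBlock.append((i,j+1))
--                 sameBlock.append((i+1,j))
--                 sameBlock.append((i+1,j+1))
--
--     sameBlock = list(set(sameBlock))
--     return sameBlock
--
-- def solution(m, n, board):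
--     b = []
--     cnt = 0
--
--     # 오른쪽 90도 회전
--     for i in range(n):
--         b.append([])
--         for j in range(1,m+1):
--             b[i].append(board[-j][i])
--
--     while True:
--         sameBlock = checkblock(m,n,b)
--
--         if not sameBlock:
--             return cnt
--
--         sameBlock.sort()
--         sameBlock.reverse()
--
--         for idx in sameBlock:
--             b[idx[0]].pop(idx[1])
--             b[idx[0]].append("0")
--             cnt += 1
-- ===== SOURCE B (Python) =====
-- def solution(m, n, board):
--     # works on the board directly (no rotation): mark all 2x2 equal alpha blocks,
--     # then rebuild each column with the surviving cells at the bottom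
--     if m < 2 or n < 2:
--         return 0
--     grid = [list(row) for row in board]
--     cnt = 0
--     while True:
--         hit = set()
--         for i in range(m - 1):
--             for j in range(n - 1):
--                 ch = grid[i][j]
--                 if ch.isalpha() and ch == grid[i][j + 1] and ch == grid[i + 1][j] and ch == grid[i + 1][j + 1]:
--                     hit.update([(i, j), (i, j + 1), (i + 1, j), (i + 1, j + 1)])
--         if not hit:
--             return cnt
--         cnt += len(hit)
--         cols = []
--         for c in range(n):
--             kept = [grid[r][c] for r in range(m) if (r, c) not in hit]
--             cols.append(['0'] * (m - len(kept)) + kept)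
--         grid = [[cols[c][r] for c in range(n)] for r in range(m)]
-- ===== Notes on version B (the rewrite author's own statement) =====
-- stated objective: alternative
-- what changed: B drops A's 90-degree rotation and its sort-descending pop/append removal: it scans 2x2 blocks on the board itself, collects hit coordinates in a set, and applies gravity by rebuilding each column from its surviving (non-hit) cells padded with '0' on top.
-- outside the precondition, e.g. on solution(2, 2, ['aa', 'aa', 'bb']): A returns 0, B returns 4
import Mathlib
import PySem

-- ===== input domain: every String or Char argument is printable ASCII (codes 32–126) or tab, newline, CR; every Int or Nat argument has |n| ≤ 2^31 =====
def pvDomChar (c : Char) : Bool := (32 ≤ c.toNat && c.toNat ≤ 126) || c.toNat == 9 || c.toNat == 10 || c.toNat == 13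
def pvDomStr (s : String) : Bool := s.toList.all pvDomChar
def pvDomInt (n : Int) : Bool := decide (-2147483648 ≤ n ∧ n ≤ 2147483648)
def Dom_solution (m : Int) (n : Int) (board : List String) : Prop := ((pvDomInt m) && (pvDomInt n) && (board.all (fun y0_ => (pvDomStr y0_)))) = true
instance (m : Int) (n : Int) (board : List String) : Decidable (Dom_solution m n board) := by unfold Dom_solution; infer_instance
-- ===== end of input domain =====

-- B drops A's 90° board rotation and pop/append gravity: it marks 2x2 blocks on the
-- board itself and rebuilds each column from its surviving cells (objective: alternative).

-- shared indexing helper: g[i][j] (Python raises when out of range; the default ' ' is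
-- never reached on inputs admitted by Pre_solution)
def pvCell (g : List (List Char)) (i j : Int) : Char :=
  ((PySem.List.pyGet? g i).bind (fun row => PySem.List.pyGet? row j)).getD ' '

-- ===== PORT A =====
-- helper checkblock(m, n, b): scan all 2x2 windows of the rotated board, list(set(...))
def checkblockA (m n : Int) (b : List (List Char)) : List (Int × Int) :=
  PySem.Set.ofList
    ((PySem.List.pyRange 0 (n-1) 1).foldl (fun acc i =>
      (PySem.List.pyRange 0 (m-1) 1).foldl (fun acc j =>
        if PySem.Chars.isalpha (pvCell b i j)
            && (pvCell b i j == pvCell b i (j+1))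
            && (pvCell b i j == pvCell b (i+1) j)
            && (pvCell b i j == pvCell b (i+1) (j+1))
        then acc ++ [(i,j), (i,j+1), (i+1,j), (i+1,j+1)]
        else acc) acc) [])

-- b[idx].pop(j); b[idx].append("0")  (pop? is none exactly where Python raises IndexError)
def pvPopAppend (row : List Char) (j : Int) : List Char :=
  match PySem.List.pop? row j with
  | some p => p.2 ++ ['0']
  | none => row

-- the 'while True' loop of A; fuel bounds the rounds (each round removes ≥ 4 cells,
-- so (m*n).toNat + 1 rounds are never exhausted on inputs admitted by Pre_solution)
def pvLoopA : Nat → Int → Int → List (List Char) → Int → Int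
  | 0, _, _, _, cnt => cnt
  | fuel+1, m, n, b, cnt =>
    let s := checkblockA m n b
    if s.isEmpty then cnt
    else
      let s2 := (PySem.List.sorted2 s (fun p => p.1) (fun p => p.2)).reverse
      let r := s2.foldl (fun (st : List (List Char) × Int) idx =>
        (st.1.modify idx.1.toNat (fun row => pvPopAppend row idx.2), st.2 + 1)) (b, cnt)
      pvLoopA fuel m n r.1 r.2

def solution (m : Int) (n : Int) (board : List String) : Int :=
  -- rotate the board 90° right: b[i][j] = board[-(j+1)][i]
  let b := (PySem.List.pyRange 0 n 1).map (fun i =>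
    (PySem.List.pyRange 1 (m+1) 1).map (fun j =>
      ((PySem.List.pyGet? board (-j)).bind (fun s => PySem.Str.pyGet? s i)).getD ' '))
  pvLoopA ((m*n).toNat + 1) m n b 0

-- ===== PORT B =====
-- the set of all cells of 2x2 uniform alphabetic blocks, scanned on the board itself
def pvHitsB (m n : Int) (g : List (List Char)) : PySem.Set (Int × Int) :=
  (PySem.List.pyRange 0 (m-1) 1).foldl (fun acc i =>
    (PySem.List.pyRange 0 (n-1) 1).foldl (fun acc j =>
      if PySem.Chars.isalpha (pvCell g i j)
          && (pvCell g i j == pvCell g i (j+1))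
          && (pvCell g i j == pvCell g (i+1) j)
          && (pvCell g i j == pvCell g (i+1) (j+1))
      then PySem.Set.update acc [(i,j), (i,j+1), (i+1,j), (i+1,j+1)]
      else acc) acc) PySem.Set.empty

-- per column: surviving cells sink to the bottom, '0' padding on top; then reassemble rows
def pvGravityB (m n : Int) (g : List (List Char)) (hit : PySem.Set (Int × Int)) :
    List (List Char) :=
  let cols := (PySem.List.pyRange 0 n 1).foldl (fun acc c =>
    let kept := (PySem.List.pyRange 0 m 1).foldl (fun ks r =>
      if !(PySem.Set.contains hit (r, c)) then ks ++ [pvCell g r c] else ks) []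
    acc ++ [PySem.List.pyRepeat ['0'] (m - kept.length) ++ kept]) []
  (PySem.List.pyRange 0 m 1).map (fun r =>
    (PySem.List.pyRange 0 n 1).map (fun c => pvCell cols c r))

-- the 'while True' loop of B (same fuel guard as A's loop)
def pvLoopB : Nat → Int → Int → List (List Char) → Int → Int
  | 0, _, _, _, cnt => cnt
  | fuel+1, m, n, g, cnt =>
    let hit := pvHitsB m n g
    if hit.isEmpty then cnt
    else pvLoopB fuel m n (pvGravityB m n g hit) (cnt + PySem.Set.len hit)

def solution_alt (m : Int) (n : Int) (board : List String) : Int :=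
  -- no 2x2 block fits in fewer than 2 rows or 2 columns
  if m < 2 || n < 2 then 0
  else pvLoopB ((m*n).toNat + 1) m n (board.map String.toList) 0

-- ===== PRECONDITION & SPEC =====
-- Pre_ admits the degenerate dimensions (m ≤ 0 or n ≤ 0, where both programs ignore the
-- board and return 0) and otherwise restricts to the task's natural domain, board an m×n
-- character grid; A also happens to return on oversized/ragged boards (reading the LAST m
-- rows through negative indexing and ignoring extra characters), which no caller sends.
def Pre_solution (m : Int) (n : Int) (board : List String) : Prop :=
  n ≤ 0 ∨ m ≤ 0 ∨ ((board.length : Int) = m ∧ ∀ s ∈ board, PySem.Str.len s = n)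

instance (m : Int) (n : Int) (board : List String) : Decidable (Pre_solution m n board) := by
  unfold Pre_solution; infer_instance

def pvWitness_solution : Int × Int × List String := (2, 2, ["ab", "ba"])

def Spec_solution (m : Int) (n : Int) (board : List String) (out : Int) : Prop :=
  out = solution_alt m n board
instance (m : Int) (n : Int) (board : List String) (out : Int) :
    Decidable (Spec_solution m n board out) := by unfold Spec_solution; infer_instance

-- ===== CLAIM (what is proved, stated in full; the proofs are below) =====
def Claim_equal_solution : Prop := ∀ (m : Int) (n : Int) (board : List String),
  Dom_solution m n board → Pre_solution m n board →
  Spec_solution m n board (solution m n board)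

-- ===== LEMMAS AND PROOFS =====

-- shapes and the rotation relation between A's state b and B's state g
def pvShape (m n : Int) (g : List (List Char)) : Prop :=
  g.length = m.toNat ∧ ∀ row ∈ g, row.length = n.toNat

def pvRel (m n : Int) (b g : List (List Char)) : Prop :=
  b.length = n.toNat ∧ (∀ row ∈ b, row.length = m.toNat) ∧
  ∀ i j : Int, 0 ≤ i → i < n → 0 ≤ j → j < m → pvCell b i j = pvCell g (m-1-j) i

-- the 2x2 test, as both ports compute it
def pvBlk (g : List (List Char)) (i j : Int) : Bool :=
  PySem.Chars.isalpha (pvCell g i j)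
    && (pvCell g i j == pvCell g i (j+1))
    && (pvCell g i j == pvCell g (i+1) j)
    && (pvCell g i j == pvCell g (i+1) (j+1))

lemma pv_raw_eq (m n : Int) (b : List (List Char)) :
    (PySem.List.pyRange 0 (n-1) 1).foldl (fun acc i =>
      (PySem.List.pyRange 0 (m-1) 1).foldl (fun acc j =>
        if PySem.Chars.isalpha (pvCell b i j)
            && (pvCell b i j == pvCell b i (j+1))
            && (pvCell b i j == pvCell b (i+1) j)
            && (pvCell b i j == pvCell b (i+1) (j+1))
        then acc ++ [(i,j), (i,j+1), (i+1,j), (i+1,j+1)]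
        else acc) acc) ([] : List (Int × Int))
    = (PySem.List.pyRange 0 (n-1) 1).flatMap (fun i =>
        (PySem.List.pyRange 0 (m-1) 1).flatMap (fun j =>
          if pvBlk b i j then [(i,j), (i,j+1), (i+1,j), (i+1,j+1)] else [])) := by
  have hinner : ∀ (i : Int) (acc : List (Int × Int)),
      (PySem.List.pyRange 0 (m-1) 1).foldl (fun acc j =>
        if PySem.Chars.isalpha (pvCell b i j)
            && (pvCell b i j == pvCell b i (j+1))
            && (pvCell b i j == pvCell b (i+1) j)
            && (pvCell b i j == pvCell b (i+1) (j+1))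
        then acc ++ [(i,j), (i,j+1), (i+1,j), (i+1,j+1)]
        else acc) acc
      = acc ++ (PySem.List.pyRange 0 (m-1) 1).flatMap (fun j =>
          if pvBlk b i j then [(i,j), (i,j+1), (i+1,j), (i+1,j+1)] else []) := by
    intro i acc
    rw [show (fun (acc : List (Int × Int)) (j : Int) =>
        if PySem.Chars.isalpha (pvCell b i j)
            && (pvCell b i j == pvCell b i (j+1))
            && (pvCell b i j == pvCell b (i+1) j)
            && (pvCell b i j == pvCell b (i+1) (j+1))
        then acc ++ [(i,j), (i,j+1), (i+1,j), (i+1,j+1)]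
        else acc)
      = (fun acc j => acc ++ (if pvBlk b i j then [(i,j), (i,j+1), (i+1,j), (i+1,j+1)] else []))
      from by funext acc j; unfold pvBlk; split <;> simp_all]
    exact PySem.List.foldl_append_eq_flatMap _ _ _
  calc _ = (PySem.List.pyRange 0 (n-1) 1).foldl (fun acc i => acc ++
        (PySem.List.pyRange 0 (m-1) 1).flatMap (fun j =>
          if pvBlk b i j then [(i,j), (i,j+1), (i+1,j), (i+1,j+1)] else [])) [] := by
        exact PySem.List.foldl_congr_mem _ _ _ _ (fun acc i _ => hinner i acc)
    _ = _ := by exact PySem.List.foldl_append_eq_flatMap _ _ _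
lemma pv_mem_checkblockA' (m n : Int) (b : List (List Char)) (p : Int × Int) :
    p ∈ checkblockA m n b ↔ ∃ i j : Int, 0 ≤ i ∧ i < n-1 ∧ 0 ≤ j ∧ j < m-1 ∧
      pvBlk b i j = true ∧ (p = (i,j) ∨ p = (i,j+1) ∨ p = (i+1,j) ∨ p = (i+1,j+1)) := by
  show p ∈ PySem.Set.ofList _ ↔ _
  rw [PySem.Set.mem_ofList, pv_raw_eq]
  simp only [List.mem_flatMap, PySem.List.mem_pyRange_one]
  constructor
  · rintro ⟨i, ⟨hi0, hi⟩, j, ⟨hj0, hj⟩, hp⟩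
    by_cases h : pvBlk b i j = true
    · rw [if_pos h] at hp
      exact ⟨i, j, hi0, hi, hj0, hj, h, by simpa using hp⟩
    · rw [if_neg h] at hp; cases hp
  · rintro ⟨i, j, hi0, hi, hj0, hj, h, hp⟩
    exact ⟨i, ⟨hi0, hi⟩, j, ⟨hj0, hj⟩, by rw [if_pos h]; simpa using hp⟩
lemma pv_mem_foldl_update (l : List Int) (P : Int → Bool) (L : Int → List (Int × Int)) :
    ∀ (s0 : PySem.Set (Int × Int)) (y : Int × Int),
    (y ∈ l.foldl (fun acc j => if P j then PySem.Set.update acc (L j) else acc) s0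
      ↔ y ∈ s0 ∨ ∃ j ∈ l, P j = true ∧ y ∈ L j) := by
  induction l with
  | nil => simp
  | cons x t ih =>
    intro s0 y
    simp only [List.foldl_cons, ih]
    by_cases h : P x = true
    · rw [if_pos h, PySem.Set.mem_update]
      constructor
      · rintro (⟨hy | hy⟩ | ⟨j, hj, hPj, hy⟩)
        · exact Or.inl hy
        · exact Or.inr ⟨x, List.mem_cons_self .., h, hy⟩
        · exact Or.inr ⟨j, List.mem_cons_of_mem _ hj, hPj, hy⟩
      · rintro (hy | ⟨j, hj, hPj, hy⟩)
        · exact Or.inl (Or.inl hy)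
        · rcases List.mem_cons.mp hj with rfl | hj
          · exact Or.inl (Or.inr hy)
          · exact Or.inr ⟨j, hj, hPj, hy⟩
    · rw [if_neg h]
      constructor
      · rintro (hy | ⟨j, hj, hPj, hy⟩)
        · exact Or.inl hy
        · exact Or.inr ⟨j, List.mem_cons_of_mem _ hj, hPj, hy⟩
      · rintro (hy | ⟨j, hj, hPj, hy⟩)
        · exact Or.inl hy
        · rcases List.mem_cons.mp hj with rfl | hj
          · exact absurd hPj h
          · exact Or.inr ⟨j, hj, hPj, hy⟩

lemma pv_mem_hitsB' (m n : Int) (g : List (List Char)) (p : Int × Int) :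
    p ∈ pvHitsB m n g ↔ ∃ i j : Int, 0 ≤ i ∧ i < m-1 ∧ 0 ≤ j ∧ j < n-1 ∧
      pvBlk g i j = true ∧ (p = (i,j) ∨ p = (i,j+1) ∨ p = (i+1,j) ∨ p = (i+1,j+1)) := by
  have key : ∀ (l : List Int) (s0 : PySem.Set (Int × Int)),
      p ∈ l.foldl (fun acc i =>
        (PySem.List.pyRange 0 (n-1) 1).foldl (fun acc j =>
          if PySem.Chars.isalpha (pvCell g i j)
              && (pvCell g i j == pvCell g i (j+1))
              && (pvCell g i j == pvCell g (i+1) j)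
              && (pvCell g i j == pvCell g (i+1) (j+1))
          then PySem.Set.update acc [(i,j), (i,j+1), (i+1,j), (i+1,j+1)]
          else acc) acc) s0
      ↔ p ∈ s0 ∨ ∃ i ∈ l, ∃ j : Int, (0 ≤ j ∧ j < n-1) ∧ pvBlk g i j = true ∧
          p ∈ [(i,j), (i,j+1), (i+1,j), (i+1,j+1)] := by
    intro l
    induction l with
    | nil => simp
    | cons x t ih =>
      intro s0
      simp only [List.foldl_cons, ih]
      rw [pv_mem_foldl_update]
      simp only [PySem.List.mem_pyRange_one, List.mem_cons]
      constructor
      · rintro ((hy | ⟨j, hj, hb, hy⟩) | ⟨i, hi, hrest⟩)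
        · exact Or.inl hy
        · exact Or.inr ⟨x, Or.inl rfl, j, hj, hb, hy⟩
        · exact Or.inr ⟨i, Or.inr hi, hrest⟩
      · rintro (hy | ⟨i, (rfl | hi), hrest⟩)
        · exact Or.inl (Or.inl hy)
        · exact Or.inl (Or.inr hrest)
        · exact Or.inr ⟨i, hi, hrest⟩
  show p ∈ (PySem.List.pyRange 0 (m-1) 1).foldl _ PySem.Set.empty ↔ _
  rw [key]
  simp only [PySem.List.mem_pyRange_one, List.mem_cons]
  constructor
  · rintro (h | ⟨i, ⟨hi0, hi⟩, j, ⟨hj0, hj⟩, hb, hp⟩)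
    · cases h
    · exact ⟨i, j, hi0, hi, hj0, hj, hb, by tauto⟩
  · rintro ⟨i, j, hi0, hi, hj0, hj, hb, hp⟩
    exact Or.inr ⟨i, ⟨hi0, hi⟩, j, ⟨hj0, hj⟩, hb, by tauto⟩
lemma pv_nodup_hitsB' (m n : Int) (g : List (List Char)) : (pvHitsB m n g).Nodup := by
  show ((PySem.List.pyRange 0 (m-1) 1).foldl _ PySem.Set.empty).Nodup
  have inner : ∀ (i : Int) (l : List Int) (s : PySem.Set (Int × Int)), s.Nodup →
      (l.foldl (fun acc j =>
        if PySem.Chars.isalpha (pvCell g i j)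
            && (pvCell g i j == pvCell g i (j+1))
            && (pvCell g i j == pvCell g (i+1) j)
            && (pvCell g i j == pvCell g (i+1) (j+1))
        then PySem.Set.update acc [(i,j), (i,j+1), (i+1,j), (i+1,j+1)]
        else acc) s).Nodup := by
    intro i l
    induction l with
    | nil => intro s hs; exact hs
    | cons x t ih =>
      intro s hs
      simp only [List.foldl_cons]
      apply ih
      split
      · exact PySem.Set.nodup_update _ _ hs
      · exact hs
  have outer : ∀ (l : List Int) (s : PySem.Set (Int × Int)), s.Nodup →
      (l.foldl (fun acc i =>
        (PySem.List.pyRange 0 (n-1) 1).foldl (fun acc j =>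
          if PySem.Chars.isalpha (pvCell g i j)
              && (pvCell g i j == pvCell g i (j+1))
              && (pvCell g i j == pvCell g (i+1) j)
              && (pvCell g i j == pvCell g (i+1) (j+1))
          then PySem.Set.update acc [(i,j), (i,j+1), (i+1,j), (i+1,j+1)]
          else acc) acc) s).Nodup := by
    intro l
    induction l with
    | nil => intro s hs; exact hs
    | cons x t ih =>
      intro s hs
      exact ih _ (inner x _ s hs)
  exact outer _ _ List.nodup_nil

lemma pv_blk_corr' (m n : Int) (b g : List (List Char)) (hR : pvRel m n b g)
    (i j : Int) (hi0 : 0 ≤ i) (hi : i < n-1) (hj0 : 0 ≤ j) (hj : j < m-1) :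
    pvBlk b i j = pvBlk g (m-2-j) i := by
  obtain ⟨-, -, hc⟩ := hR
  have e1 : pvCell b i j = pvCell g (m-1-j) i := hc i j hi0 (by omega) hj0 (by omega)
  have e2 : pvCell b i (j+1) = pvCell g (m-2-j) i := by
    have := hc i (j+1) hi0 (by omega) (by omega) (by omega)
    rwa [show m-1-(j+1) = m-2-j by ring] at this
  have e3 : pvCell b (i+1) j = pvCell g (m-1-j) (i+1) := hc (i+1) j (by omega) (by omega) hj0 (by omega)
  have e4 : pvCell b (i+1) (j+1) = pvCell g (m-2-j) (i+1) := by
    have := hc (i+1) (j+1) (by omega) (by omega) (by omega) (by omega)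
    rwa [show m-1-(j+1) = m-2-j by ring] at this
  have e5 : m-2-j+1 = m-1-j := by ring
  unfold pvBlk
  rw [e1, e2, e3, e4, e5]
  set x := pvCell g (m-1-j) i
  set y := pvCell g (m-2-j) i
  set z := pvCell g (m-1-j) (i+1)
  set w := pvCell g (m-2-j) (i+1)
  rw [Bool.eq_iff_iff]
  simp only [Bool.and_eq_true, beq_iff_eq]
  constructor
  · rintro ⟨⟨⟨ha, h1⟩, h2⟩, h3⟩
    rw [← h1, ← h2, ← h3]; exact ⟨⟨⟨ha, rfl⟩, rfl⟩, rfl⟩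
  · rintro ⟨⟨⟨ha, h1⟩, h2⟩, h3⟩
    rw [h2] at ha h1 h3 ⊢
    exact ⟨⟨⟨ha, rfl⟩, h3.symm ▸ rfl⟩, h1.symm ▸ rfl⟩
lemma pv_mem_corr' (m n : Int) (b g : List (List Char)) (hR : pvRel m n b g) (p : Int × Int) :
    p ∈ checkblockA m n b ↔ (m-1-p.2, p.1) ∈ pvHitsB m n g := by
  constructor
  · intro hp
    rw [pv_mem_checkblockA'] at hp
    obtain ⟨i, j, hi0, hi, hj0, hj, hb, hp⟩ := hp
    rw [pv_mem_hitsB']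
    refine ⟨m-2-j, i, by omega, by omega, hi0, hi, ?_, ?_⟩
    · rw [← pv_blk_corr' m n b g hR i j hi0 hi hj0 hj]; exact hb
    · rcases hp with rfl | rfl | rfl | rfl <;> simp <;> omega
  · intro hp
    rw [pv_mem_hitsB'] at hp
    obtain ⟨r, c, hr0, hr, hc0, hc, hb, hp⟩ := hp
    rw [pv_mem_checkblockA']
    refine ⟨c, m-2-r, hc0, hc, by omega, by omega, ?_, ?_⟩
    · rw [pv_blk_corr' m n b g hR c (m-2-r) hc0 hc (by omega) (by omega),
        show m-2-(m-2-r) = r by ring]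
      exact hb
    · have hps : (m-1-p.2, p.1) = (r,c) ∨ (m-1-p.2, p.1) = (r,c+1)
          ∨ (m-1-p.2, p.1) = (r+1,c) ∨ (m-1-p.2, p.1) = (r+1,c+1) := hp
      rcases hps with h | h | h | h <;>
      · obtain ⟨h1, h2⟩ := Prod.mk.injEq .. ▸ h
        have : p = (p.1, p.2) := rfl
        rw [this]
        simp only [Prod.mk.injEq]
        omega
lemma pv_len_corr' (m n : Int) (b g : List (List Char)) (hR : pvRel m n b g) :
    (checkblockA m n b).length = (pvHitsB m n g).length := by
  have hinj : ∀ x ∈ checkblockA m n b, ∀ y ∈ checkblockA m n b,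
      ((m:Int)-1-(Prod.snd x), Prod.fst x) = ((m:Int)-1-(Prod.snd y), Prod.fst y) → x = y := by
    rintro ⟨a1,a2⟩ - ⟨c1,c2⟩ - h
    simp only [Prod.mk.injEq] at h ⊢
    omega
  have hnA : (checkblockA m n b).Nodup := PySem.Set.nodup_ofList _
  have hnM : ((checkblockA m n b).map (fun p => (m-1-p.2, p.1))).Nodup :=
    List.Nodup.map_on hinj hnA
  have hperm : ((checkblockA m n b).map (fun p => (m-1-p.2, p.1))).Perm (pvHitsB m n g) := by
    rw [List.perm_ext_iff_of_nodup hnM (pv_nodup_hitsB' m n g)]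
    intro q
    simp only [List.mem_map]
    constructor
    · rintro ⟨p, hp, rfl⟩
      exact (pv_mem_corr' m n b g hR p).mp hp
    · intro hq
      refine ⟨(q.2, m-1-q.1), ?_, ?_⟩
      · rw [pv_mem_corr' m n b g hR]
        simpa [show m-1-(m-1-q.1) = q.1 by ring] using hq
      · simp [show m-1-(m-1-q.1) = q.1 by ring]
  have := hperm.length_eq
  simpa using this
lemma pv_fold_remove' (L : List (Int × Int)) :
    ∀ (b : List (List Char)) (cnt : Int),
    (∀ p ∈ L, 0 ≤ p.1 ∧ p.1 < (b.length : Int)) →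
    (L.foldl (fun (st : List (List Char) × Int) idx =>
        (st.1.modify idx.1.toNat (fun row => pvPopAppend row idx.2), st.2 + 1)) (b, cnt))
      = (b.mapIdx (fun k row =>
            ((L.filter (fun p => decide (p.1 = (k:Int)))).map (·.2)).foldl pvPopAppend row),
         cnt + L.length) := by
  induction L with
  | nil =>
    intro b cnt _
    simp only [List.foldl_nil, List.filter_nil, List.map_nil, List.length_nil]
    refine Prod.ext ?_ (by simp)
    apply List.ext_getElem (by simp)
    intro k hk1 hk2
    simp [List.getElem_mapIdx]
  | cons p t ih =>
    intro b cnt hL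
    have hp := hL p (List.mem_cons_self ..)
    simp only [List.foldl_cons]
    rw [ih _ (cnt + 1) (by
      intro q hq
      have := hL q (List.mem_cons_of_mem _ hq)
      simpa [List.length_modify] using this)]
    refine Prod.ext ?_ (by simp; omega)
    apply List.ext_getElem (by simp [List.length_modify])
    intro k hk1 hk2
    simp only [List.getElem_mapIdx, List.length_modify] at hk1 ⊢
    rw [List.getElem_modify]
    by_cases hpk : p.1 = (k : Int)
    · have hik : p.1.toNat = k := by omega
      rw [if_pos hik, List.filter_cons_of_pos (by simpa using hpk)]
      simp [List.foldl_cons]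
    · have hik : p.1.toNat ≠ k := by omega
      rw [if_neg hik, List.filter_cons_of_neg (by simpa using hpk)]
lemma pv_map_getD_range (row : List Char) :
    (List.range row.length).map (fun p => row.getD p ' ') = row := by
  apply List.ext_getElem (by simp)
  intro k hk1 hk2
  simp [List.getD_eq_getElem?_getD, List.getElem?_eq_getElem hk2]

lemma pv_pops_eq' (js : List Int) :
    ∀ (row : List Char), js.Pairwise (· > ·) → (∀ j ∈ js, 0 ≤ j ∧ j < (row.length : Int)) →
    js.foldl pvPopAppend row =
      ((List.range row.length).filter (fun p : Nat => decide (((p : Int)) ∉ js))).map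
          (fun p => row.getD p ' ')
        ++ List.replicate js.length '0' := by
  induction js with
  | nil =>
    intro row _ _
    simp only [List.foldl_nil, List.not_mem_nil, not_false_iff, decide_true, List.filter_true,
      List.replicate_zero, List.append_nil, List.length_nil]
    rw [pv_map_getD_range]
  | cons j rest ih =>
    intro row hpw hbd
    have hj := hbd j (List.mem_cons_self ..)
    have hgt : ∀ x ∈ rest, x < j := fun x hx => (List.pairwise_cons.mp hpw).1 x hx
    have hpwr : rest.Pairwise (· > ·) := (List.pairwise_cons.mp hpw).2
    set jn := j.toNat with hjn
    have hjn_lt : jn < row.length := by omega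
    have hjeq : j = (jn : Int) := by omega
    have hstep : pvPopAppend row j = row.eraseIdx jn ++ ['0'] := by
      unfold pvPopAppend
      rw [hjeq, PySem.List.pop?_natCast row jn hjn_lt]
    set row' := row.eraseIdx jn ++ ['0'] with hrow'
    have hel : (row.eraseIdx jn).length = row.length - 1 := by
      rw [List.length_eraseIdx, if_pos hjn_lt]
    have hlen' : row'.length = row.length := by
      rw [hrow', List.length_append, hel]
      simp
      omega
    have hbd' : ∀ q ∈ rest, 0 ≤ q ∧ q < (row'.length : Int) := by
      intro q hq
      have := hbd q (List.mem_cons_of_mem _ hq)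
      omega
    set K := row.length - 1 - jn with hK
    set C1 := ((List.range jn).filter (fun p : Nat => decide (((p : Int)) ∉ rest))).map
        (fun p => row.getD p ' ') with hC1
    set C2 := (List.range K).map (fun x => row.getD (jn + x + 1) ' ') with hC2
    -- getD facts about row'
    have hg1 : ∀ p : Nat, p < jn → row'.getD p ' ' = row.getD p ' ' := by
      intro p hp
      rw [hrow']
      simp only [List.getD_eq_getElem?_getD]
      rw [List.getElem?_append_left (by omega), List.getElem?_eraseIdx, if_pos hp]
    have hg2 : ∀ x : Nat, x < K → row'.getD (jn + x) ' ' = row.getD (jn + x + 1) ' ' := by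
      intro x hx
      rw [hrow']
      simp only [List.getD_eq_getElem?_getD]
      rw [List.getElem?_append_left (by omega), List.getElem?_eraseIdx, if_neg (by omega)]
    have hg3 : row'.getD (jn + K) ' ' = '0' := by
      rw [hrow']
      simp only [List.getD_eq_getElem?_getD]
      rw [List.getElem?_append_right (by omega)]
      have : jn + K - (row.eraseIdx jn).length = 0 := by omega
      rw [this]
      rfl
    have hsplit : List.range row.length
        = List.range jn ++ (List.range (row.length - jn)).map (fun x => jn + x) := by
      rw [← List.range_add, Nat.add_sub_cancel' (le_of_lt hjn_lt)]
    have hsplitL : List.range (row.length - jn) = List.range K ++ [K] := by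
      rw [show row.length - jn = K + 1 by omega, List.range_succ]
    have hsplitR : List.range (row.length - jn) = 0 :: (List.range K).map (· + 1) := by
      rw [show row.length - jn = K + 1 by omega, List.range_succ_eq_map]
    -- LHS kept cells of row'
    have hL : ((List.range row.length).filter (fun p : Nat => decide (((p : Int)) ∉ rest))).map
          (fun p => row'.getD p ' ') = C1 ++ (C2 ++ ['0']) := by
      rw [hsplit, hsplitL, List.map_append, List.filter_append, List.map_append]
      congr 1
      · -- chunk over range jn
        rw [hC1]
        apply List.map_congr_left
        intro p hp
        have : p < jn := List.mem_range.mp (List.mem_of_mem_filter hp)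
        exact hg1 p this
      · -- chunk over the shifted tail
        rw [← List.map_append, List.filter_map, List.map_map]
        have hft : ((List.range K ++ [K]).filter
            ((fun p : Nat => decide (((p : Int)) ∉ rest)) ∘ fun x => jn + x))
            = List.range K ++ [K] := by
          apply List.filter_eq_self.mpr
          intro x hx
          simp only [Function.comp_apply, decide_eq_true_eq]
          intro hmem
          have := hgt _ hmem
          omega
        rw [hft, List.map_append]
        congr 1
        · rw [hC2]
          apply List.map_congr_left
          intro x hx
          have : x < K := List.mem_range.mp hx
          simp only [Function.comp_apply]
          exact hg2 x this
        · simp only [List.map_cons, List.map_nil, Function.comp_apply]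
          rw [hg3]
    -- RHS kept cells of row
    have hR : ((List.range row.length).filter (fun p : Nat => decide (((p : Int)) ∉ j :: rest))).map
          (fun p => row.getD p ' ') = C1 ++ C2 := by
      rw [hsplit, hsplitR, List.filter_append, List.map_append]
      congr 1
      · rw [hC1]
        congr 1
        apply List.filter_congr
        intro p hp
        have hplt : p < jn := List.mem_range.mp hp
        simp only [List.mem_cons, decide_eq_true_eq, decide_eq_decide]
        constructor
        · intro h hm; exact h (Or.inr hm)
        · rintro h (heq | hm)
          · omega
          · exact h hm
      · simp only [List.map_cons, List.filter_cons]
        rw [if_neg (by simp only [List.mem_cons, decide_eq_true_eq]; push_neg; omega)]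
        rw [List.map_map, List.filter_map]
        have hft : ((List.range K).filter
            ((fun p : Nat => decide (((p : Int)) ∉ j :: rest)) ∘ ((fun x => jn + x) ∘ fun x => x + 1)))
            = List.range K := by
          apply List.filter_eq_self.mpr
          intro x hx
          simp only [Function.comp_apply, decide_eq_true_eq, List.mem_cons]
          push_neg
          constructor
          · omega
          · intro hmem
            have := hgt _ hmem
            omega
        rw [hft, List.map_map, hC2]
        apply List.map_congr_left
        intro x hx
        simp only [Function.comp_apply]
        congr 1
    simp only [List.foldl_cons, hstep, ← hrow']
    rw [ih row' hpwr hbd', hlen', hL, hR]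
    simp [List.replicate_succ, List.append_assoc]
lemma pv_pairwise_insertBy {α : Type} (before : α → α → Bool) (R : α → α → Prop)
    (htrans : ∀ a b c, R a b → R b c → R a c)
    (ht : ∀ a b, before a b = true → R a b) (hf : ∀ a b, before a b = false → R b a)
    (x : α) :
    ∀ l : List α, l.Pairwise R → (PySem.List.insertBy before x l).Pairwise R := by
  intro l
  induction l with
  | nil => intro _; simp [PySem.List.insertBy]
  | cons y ys ih =>
    intro hl
    rw [List.pairwise_cons] at hl
    show (if before x y = true then x :: y :: ys else y :: PySem.List.insertBy before x ys).Pairwise R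
    split
    · rename_i h
      rw [List.pairwise_cons]
      refine ⟨?_, List.pairwise_cons.mpr hl⟩
      intro z hz
      rcases List.mem_cons.mp hz with rfl | hz
      · exact ht _ _ h
      · exact htrans _ _ _ (ht _ _ h) (hl.1 z hz)
    · rename_i h
      rw [List.pairwise_cons]
      refine ⟨?_, ih hl.2⟩
      intro z hz
      rcases (PySem.List.mem_insertBy _ _ _ _).mp hz with rfl | hz
      · exact hf _ _ (Bool.eq_false_iff.mpr h)
      · exact hl.1 z hz

lemma pv_sorted2_pairwise' (xs : List (Int × Int)) :
    (PySem.List.sorted2 xs (fun p => p.1) (fun p => p.2) false).Pairwise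
      (fun a b => a.1 < b.1 ∨ (a.1 = b.1 ∧ a.2 ≤ b.2)) := by
  have hdef : PySem.List.sorted2 xs (fun p : Int × Int => p.1) (fun p => p.2) false
      = xs.foldl (fun acc x => PySem.List.insertBy
          (fun a b => decide (a.1 < b.1) || !decide (b.1 < a.1) && decide (a.2 < b.2)) x acc) [] := rfl
  rw [hdef]
  have key : ∀ (l : List (Int × Int)) (acc : List (Int × Int)),
      acc.Pairwise (fun a b => a.1 < b.1 ∨ (a.1 = b.1 ∧ a.2 ≤ b.2)) →
      (l.foldl (fun acc x => PySem.List.insertBy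
          (fun a b => decide (a.1 < b.1) || !decide (b.1 < a.1) && decide (a.2 < b.2)) x acc) acc).Pairwise
        (fun a b => a.1 < b.1 ∨ (a.1 = b.1 ∧ a.2 ≤ b.2)) := by
    intro l
    induction l with
    | nil => intro acc h; exact h
    | cons x t ih =>
      intro acc h
      refine ih _ (pv_pairwise_insertBy _ _ ?_ ?_ ?_ x acc h)
      · rintro a b c (h1 | ⟨h1, h1'⟩) (h2 | ⟨h2, h2'⟩) <;> [left; left; left; right] <;> omega
      · intro a b hab
        simp only [Bool.or_eq_true, Bool.and_eq_true, Bool.not_eq_true', decide_eq_true_eq,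
          decide_eq_false_iff_not] at hab
        rcases hab with h1 | ⟨h1, h2⟩
        · left; exact h1
        · by_cases hlt : a.1 < b.1
          · left; exact hlt
          · right; omega
      · intro a b hab
        have h1 : ¬ (a.1 < b.1) := by
          intro hc; simp [hc] at hab
        by_cases hlt : b.1 < a.1
        · left; exact hlt
        · have h2 : ¬ (a.2 < b.2) := by
            intro hc; simp [h1, hlt, hc] at hab
          right; omega
  exact key xs [] List.Pairwise.nil
lemma pv_countP_not {α : Type} (l : List α) (p : α → Bool) :
    l.countP p + l.countP (fun a => !(p a)) = l.length := by
  induction l with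
  | nil => rfl
  | cons x t ih =>
    by_cases h : p x = true
    · simp [List.countP_cons, h]; omega
    · simp [List.countP_cons, h, Bool.eq_false_iff.mpr h]; omega

-- the padded column c that B's gravity builds
def pvKept (m : Int) (g : List (List Char)) (hit : PySem.Set (Int × Int)) (c : Int) :
    List Char :=
  ((PySem.List.pyRange 0 m 1).filter (fun r => !(PySem.Set.contains hit (r, c)))).map
    (fun r => pvCell g r c)

def pvCol (m : Int) (g : List (List Char)) (hit : PySem.Set (Int × Int)) (c : Int) :
    List Char :=
  PySem.List.pyRepeat ['0'] (m - (pvKept m g hit c).length) ++ pvKept m g hit c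

lemma pv_gravity_eq (m n : Int) (g : List (List Char)) (hit : PySem.Set (Int × Int)) :
    pvGravityB m n g hit = (PySem.List.pyRange 0 m 1).map (fun r =>
      (PySem.List.pyRange 0 n 1).map (fun c =>
        pvCell ((PySem.List.pyRange 0 n 1).map (pvCol m g hit)) c r)) := by
  unfold pvGravityB
  have hcols : (PySem.List.pyRange 0 n 1).foldl (fun acc c =>
      let kept := (PySem.List.pyRange 0 m 1).foldl (fun ks r =>
        if !(PySem.Set.contains hit (r, c)) then ks ++ [pvCell g r c] else ks) []
      acc ++ [PySem.List.pyRepeat ['0'] (m - kept.length) ++ kept]) []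
      = (PySem.List.pyRange 0 n 1).map (pvCol m g hit) := by
    have hbody : ∀ (acc : List (List Char)) (c : Int),
        (let kept := (PySem.List.pyRange 0 m 1).foldl (fun ks r =>
          if !(PySem.Set.contains hit (r, c)) then ks ++ [pvCell g r c] else ks) []
        acc ++ [PySem.List.pyRepeat ['0'] (m - kept.length) ++ kept])
        = acc ++ [pvCol m g hit c] := by
      intro acc c
      have : (PySem.List.pyRange 0 m 1).foldl (fun ks r =>
          if !(PySem.Set.contains hit (r, c)) then ks ++ [pvCell g r c] else ks) []
          = pvKept m g hit c := by
        rw [PySem.List.foldl_append_if (fun r => !(PySem.Set.contains hit (r, c)))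
          (fun r => pvCell g r c)]
        rfl
      simp only [this, pvCol]
    rw [PySem.List.foldl_congr_mem _ _ _ _ (fun acc c _ => hbody acc c)]
    exact (PySem.List.foldl_append_singleton_eq_map _ _ _).trans (by rw [List.nil_append])
  rw [hcols]

lemma pv_cell_grid (F : Int → List Char) (N i j : Int) (h0 : 0 ≤ i) (hN : i < N) :
    pvCell ((PySem.List.pyRange 0 N 1).map F) i j = ((PySem.List.pyGet? (F i) j)).getD ' ' := by
  unfold pvCell
  rw [PySem.List.pyGet?_of_nonneg _ h0]
  rw [show N = ((N.toNat : Int)) by omega]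
  rw [PySem.List.getElem?_map_pyRange_zero F N.toNat i.toNat (by omega)]
  rw [show ((i.toNat : Int)) = i by omega]
  rfl

lemma pv_kept_len_le (m : Int) (g : List (List Char)) (hit : PySem.Set (Int × Int)) (c : Int) :
    (pvKept m g hit c).length ≤ m.toNat := by
  unfold pvKept
  calc _ = _ := List.length_map ..
    _ ≤ (PySem.List.pyRange 0 m 1).length := List.length_filter_le _ _
    _ = m.toNat := by rw [PySem.List.length_pyRange_one]; omega

lemma pv_col_length (m : Int) (g : List (List Char)) (hit : PySem.Set (Int × Int)) (c : Int) :
    (pvCol m g hit c).length = m.toNat := by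
  have hle := pv_kept_len_le m g hit c
  unfold pvCol
  rw [List.length_append, PySem.List.pyRepeat_singleton, List.length_replicate]
  omega

lemma pv_shape_gravity (m n : Int) (g : List (List Char)) (hit : PySem.Set (Int × Int)) :
    pvShape m n (pvGravityB m n g hit) := by
  rw [pv_gravity_eq]
  constructor
  · rw [List.length_map, PySem.List.length_pyRange_one]; omega
  · intro row hrow
    obtain ⟨r, hr, rfl⟩ := List.mem_map.mp hrow
    rw [List.length_map, PySem.List.length_pyRange_one]; omega

lemma pv_cell_gravity (m n : Int) (g : List (List Char)) (hit : PySem.Set (Int × Int))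
    (r c : Int) (hr0 : 0 ≤ r) (hr : r < m) (hc0 : 0 ≤ c) (hc : c < n) :
    pvCell (pvGravityB m n g hit) r c = ((pvCol m g hit c)[r.toNat]?).getD ' ' := by
  rw [pv_gravity_eq]
  rw [pv_cell_grid _ m r c hr0 hr]
  have : PySem.List.pyGet? ((PySem.List.pyRange 0 n 1).map (fun c =>
      pvCell ((PySem.List.pyRange 0 n 1).map (pvCol m g hit)) c r)) c
      = some (pvCell ((PySem.List.pyRange 0 n 1).map (pvCol m g hit)) c r) := by
    rw [PySem.List.pyGet?_of_nonneg _ hc0, show n = ((n.toNat : Int)) by omega,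
      PySem.List.getElem?_map_pyRange_zero _ n.toNat c.toNat (by omega),
      show ((c.toNat : Int)) = c by omega]
  rw [this, Option.getD_some, pv_cell_grid (pvCol m g hit) n c r hc0 hc,
    PySem.List.pyGet?_of_nonneg _ hr0]
lemma pv_cell_nat (b : List (List Char)) (k p : Nat) (hk : k < b.length) :
    pvCell b (k : Int) (p : Int) = (b[k]).getD p ' ' := by
  unfold pvCell
  rw [PySem.List.pyGet?_natCast, List.getElem?_eq_getElem hk]
  simp [PySem.List.pyGet?_natCast, List.getD_eq_getElem?_getD]

-- the descending per-row pop lists taken from the sorted marked cells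
lemma pv_js_mem (s2 SA : List (Int × Int)) (hperm : s2.Perm SA) (k : Nat) (x : Int) :
    (x ∈ (s2.filter (fun p => decide (p.1 = (k:Int)))).map (·.2)) ↔ ((k:Int), x) ∈ SA := by
  rw [List.mem_map]
  constructor
  · rintro ⟨p, hp, rfl⟩
    have hm := List.mem_filter.mp hp
    have h1 : p.1 = (k:Int) := by simpa using hm.2
    have : p = ((k:Int), p.2) := by rw [← h1]
    rw [← this]
    exact hperm.mem_iff.mp hm.1
  · intro hx
    refine ⟨((k:Int), x), List.mem_filter.mpr ⟨hperm.mem_iff.mpr hx, by simp⟩, rfl⟩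
lemma pv_count_eq (m n : Int) (b g : List (List Char)) (hR : pvRel m n b g)
    (s2 : List (Int × Int)) (hperm : s2.Perm (checkblockA m n b)) (k : Nat) :
    ((s2.filter (fun p => decide (p.1 = (k:Int)))).map (·.2)).length
      = (m - ((pvKept m g (pvHitsB m n g) (k:Int)).length : Int)).toNat := by
  set SA := checkblockA m n b with hSA
  set hit := pvHitsB m n g with hhit
  set M := m.toNat with hM
  have hmemSA : ∀ p ∈ SA, 0 ≤ p.1 ∧ p.1 < n ∧ 0 ≤ p.2 ∧ p.2 < m := by
    intro p hp
    rw [hSA, pv_mem_checkblockA'] at hp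
    obtain ⟨i, j, hi0, hi, hj0, hj, _, hp4⟩ := hp
    rcases hp4 with rfl | rfl | rfl | rfl <;> constructor <;> [omega; skip; omega; skip; omega; skip; omega; skip] <;>
      refine ⟨by omega, ?_, by omega⟩ <;> omega
  have hnodSA : SA.Nodup := PySem.Set.nodup_ofList _
  -- length of the pop list = number of marked cells of column k of g, counted over range M
  have h1 : ((s2.filter (fun p => decide (p.1 = (k:Int)))).map (·.2)).length
      = ((List.range M).filter (fun p : Nat => decide (((k:Int), (p:Int)) ∈ SA))).length := by
    have hnA : ((s2.filter (fun p => decide (p.1 = (k:Int)))).map (·.2)).Nodup := by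
      apply List.Nodup.map_on
      · intro x hx y hy hxy
        have hx1 : x.1 = (k:Int) := by simpa using (List.mem_filter.mp hx).2
        have hy1 : y.1 = (k:Int) := by simpa using (List.mem_filter.mp hy).2
        exact Prod.ext (hx1.trans hy1.symm) hxy
      · exact (hperm.nodup_iff.mpr hnodSA).filter _
    have hnB : (((List.range M).filter (fun p : Nat => decide (((k:Int), (p:Int)) ∈ SA))).map
        (fun p : Nat => (p : Int))).Nodup := by
      apply List.Nodup.map_on
      · intro x _ y _ h; exact_mod_cast h
      · exact (List.nodup_range).filter _
    have hpm : ((s2.filter (fun p => decide (p.1 = (k:Int)))).map (·.2)).Perm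
        (((List.range M).filter (fun p : Nat => decide (((k:Int), (p:Int)) ∈ SA))).map
          (fun p : Nat => (p : Int))) := by
      rw [List.perm_ext_iff_of_nodup hnA hnB]
      intro x
      rw [pv_js_mem s2 SA hperm k x]
      simp only [List.mem_map, List.mem_filter, List.mem_range, decide_eq_true_eq]
      constructor
      · intro hx
        have hb := hmemSA _ hx
        refine ⟨x.toNat, ⟨by omega, ?_⟩, by omega⟩
        rw [show ((x.toNat : Nat) : Int) = x by omega]
        exact hx
      · rintro ⟨p, ⟨hp, hmem⟩, rfl⟩
        exact hmem
    rw [hpm.length_eq, List.length_map]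
  have h1b : ((List.range M).filter (fun p : Nat => decide (((k:Int), (p:Int)) ∈ SA))).length
      = ((List.range M).filter (fun r : Nat => decide (((r:Int), (k:Int)) ∈ hit))).length := by
    simp only [← List.countP_eq_length_filter]
    have e1 : (List.range M).countP (fun p : Nat => decide (((k:Int), (p:Int)) ∈ SA))
        = (List.range M).countP (fun p : Nat => decide ((((M - 1 - p : Nat) : Int), (k:Int)) ∈ hit)) := by
      apply List.countP_congr
      intro p hp
      have hpM : p < M := List.mem_range.mp hp
      simp only [decide_eq_true_eq]
      rw [pv_mem_corr' m n b g hR ((k:Int), (p:Int))]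
      rw [show (m - 1 - ((k:Int), (p:Int)).2) = ((M - 1 - p : Nat) : Int) by simp; omega]
    rw [e1]
    have e2 : (List.range M).countP (fun p : Nat => decide ((((M - 1 - p : Nat) : Int), (k:Int)) ∈ hit))
        = ((List.range M).map (fun p => M - 1 - p)).countP
            (fun r : Nat => decide (((r:Int), (k:Int)) ∈ hit)) := by
      rw [List.countP_map]
      rfl
    rw [e2]
    have e3 : (List.range M).map (fun p => M - 1 - p) = (List.range M).reverse := by
      rw [List.range_eq_range', List.reverse_range', ← List.range_eq_range']
      apply List.map_congr_left
      intro p hp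
      omega
    rw [e3, List.countP_reverse]
  have h2 : (pvKept m g hit (k:Int)).length
      = ((List.range M).filter (fun r : Nat => !(decide (((r:Int), (k:Int)) ∈ hit)))).length := by
    unfold pvKept
    rw [List.length_map, PySem.List.pyRange_one 0 m, List.filter_map, List.length_map]
    simp only [← List.countP_eq_length_filter]
    rw [show (m - 0).toNat = M by omega]
    apply List.countP_congr
    intro p hp
    simp only [Function.comp_apply]
    rw [show (0 : Int) + (p : Int) = (p : Int) by omega]
    cases hc : PySem.Set.contains hit ((p:Int), (k:Int)) with
    | true => simp [(PySem.Set.contains_iff hit _).mp hc]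
    | false =>
      have hnm : ((p:Int), (k:Int)) ∉ hit := fun hm => by
        rw [(PySem.Set.contains_iff hit _).mpr hm] at hc
        cases hc
      simp [hc, hnm]
  have hsum := pv_countP_not (List.range M) (fun r : Nat => decide (((r:Int), (k:Int)) ∈ hit))
  simp only [← List.countP_eq_length_filter] at h1 h1b h2
  have hlen : (List.range M).length = M := List.length_range
  have hkle : (pvKept m g hit (k:Int)).length ≤ M := pv_kept_len_le m g hit (k:Int)
  omega
lemma pv_SA_bounds (m n : Int) (b : List (List Char)) (p : Int × Int)
    (hp : p ∈ checkblockA m n b) : 0 ≤ p.1 ∧ p.1 < n ∧ 0 ≤ p.2 ∧ p.2 < m := by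
  rw [pv_mem_checkblockA'] at hp
  obtain ⟨i, j, hi0, hi, hj0, hj, _, hp4⟩ := hp
  rcases hp4 with rfl | rfl | rfl | rfl <;>
    exact ⟨by omega, by omega, by omega, by omega⟩

lemma pv_row_eq (m n : Int) (b g : List (List Char)) (hR : pvRel m n b g)
    (s2 : List (Int × Int)) (hperm : s2.Perm (checkblockA m n b))
    (hs2pw : s2.Pairwise (fun a b => b.1 < a.1 ∨ (b.1 = a.1 ∧ b.2 ≤ a.2)))
    (k : Nat) (hk : k < b.length) :
    ((s2.filter (fun p => decide (p.1 = (k:Int)))).map (·.2)).foldl pvPopAppend b[k]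
      = (pvCol m g (pvHitsB m n g) (k:Int)).reverse := by
  set SA := checkblockA m n b with hSA
  set hit := pvHitsB m n g with hhit
  set M := m.toNat with hM
  have hs2nd : s2.Nodup := hperm.nodup_iff.mpr (PySem.Set.nodup_ofList _)
  have hrl : b[k].length = M := hR.2.1 _ (List.getElem_mem _)
  have hbl : b.length = n.toNat := hR.1
  have hjspw : ((s2.filter (fun p => decide (p.1 = (k:Int)))).map (·.2)).Pairwise (· > ·) := by
    rw [List.pairwise_map]
    rw [List.pairwise_filter]
    refine (hs2pw.and hs2nd).imp ?_
    rintro a c ⟨hord, hne⟩ ha hc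
    simp only [decide_eq_true_eq] at ha hc
    rcases hord with h | ⟨h1, h2⟩
    · omega
    · have : a.2 ≠ c.2 := fun he => hne (Prod.ext (ha.trans hc.symm) he)
      omega
  have hjsbnd : ∀ x ∈ (s2.filter (fun p => decide (p.1 = (k:Int)))).map (·.2),
      0 ≤ x ∧ x < ((b[k].length : Int)) := by
    intro x hx
    have := pv_SA_bounds m n b _ ((pv_js_mem s2 SA hperm k x).mp hx)
    rw [hrl]
    omega
  rw [pv_pops_eq' _ _ hjspw hjsbnd, hrl]
  unfold pvCol
  rw [List.reverse_append, PySem.List.pyRepeat_singleton, List.reverse_replicate]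
  congr 1
  · -- surviving cells
    unfold pvKept
    rw [PySem.List.pyRange_one 0 m, show (m - 0).toNat = M by omega]
    rw [List.filter_map, List.map_map, ← List.map_reverse, ← List.filter_reverse,
      List.range_eq_range', List.reverse_range', ← List.range_eq_range',
      List.filter_map, List.map_map]
    have hfc : ∀ p ∈ List.range M, (fun p : Nat => decide (((p:Int)) ∉
          (s2.filter (fun q => decide (q.1 = (k:Int)))).map (·.2))) p
        = (((fun r => !(PySem.Set.contains hit (r, (k:Int)))) ∘ (fun t : Nat => (0:Int) + (t:Int)))
            ∘ (fun x => 0 + M - 1 - x)) p := by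
      intro p hp
      have hpM : p < M := List.mem_range.mp hp
      simp only [Function.comp_apply]
      rw [show (0:Int) + ((0 + M - 1 - p : Nat) : Int) = m - 1 - (p:Int) by omega]
      have hiff2 : (((p:Int)) ∈ (s2.filter (fun q => decide (q.1 = (k:Int)))).map (·.2))
          ↔ ((m - 1 - (p:Int), (k:Int)) ∈ hit) := by
        rw [pv_js_mem s2 SA hperm k ((p:Int))]
        have := pv_mem_corr' m n b g hR (((k:Int)), ((p:Int)))
        simpa using this
      cases hc : PySem.Set.contains hit (m - 1 - (p:Int), (k:Int)) with
      | true =>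
        have hin := hiff2.mpr ((PySem.Set.contains_iff hit _).mp hc)
        simp [hin]
      | false =>
        have hout : ¬ (((p:Int)) ∈ (s2.filter (fun q => decide (q.1 = (k:Int)))).map (·.2)) :=
          fun hm => by
            rw [(PySem.Set.contains_iff hit _).mpr (hiff2.mp hm)] at hc
            cases hc
        simp [hout]
    rw [List.filter_congr hfc]
    apply List.map_congr_left
    intro p hp
    have hpM : p < M := List.mem_range.mp (List.mem_of_mem_filter hp)
    simp only [Function.comp_apply]
    rw [show (0:Int) + ((0 + M - 1 - p : Nat) : Int) = m - 1 - (p:Int) by omega]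
    have h1 : b[k].getD p ' ' = pvCell b ((k:Int)) ((p:Int)) := (pv_cell_nat b k p hk).symm
    rw [h1]
    exact hR.2.2 ((k:Int)) ((p:Int)) (by omega) (by omega) (by omega) (by omega)
  · -- the '0' padding
    rw [pv_count_eq m n b g hR s2 hperm k]
lemma pv_step (m n : Int) (b g : List (List Char)) (cnt : Int)
    (hS : pvShape m n g) (hR : pvRel m n b g) :
    (((PySem.List.sorted2 (checkblockA m n b) (fun p => p.1) (fun p => p.2) false).reverse).foldl
        (fun (st : List (List Char) × Int) idx =>
          (st.1.modify idx.1.toNat (fun row => pvPopAppend row idx.2), st.2 + 1)) (b, cnt)).2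
      = cnt + PySem.Set.len (pvHitsB m n g) ∧
    pvRel m n
      (((PySem.List.sorted2 (checkblockA m n b) (fun p => p.1) (fun p => p.2) false).reverse).foldl
        (fun (st : List (List Char) × Int) idx =>
          (st.1.modify idx.1.toNat (fun row => pvPopAppend row idx.2), st.2 + 1)) (b, cnt)).1
      (pvGravityB m n g (pvHitsB m n g)) ∧
    pvShape m n (pvGravityB m n g (pvHitsB m n g)) := by
  set SA := checkblockA m n b with hSA
  set hit := pvHitsB m n g with hhit
  set s2 := (PySem.List.sorted2 SA (fun p => p.1) (fun p => p.2) false).reverse with hs2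
  have hperm : s2.Perm SA :=
    (List.reverse_perm _).trans (PySem.List.sorted2_perm SA (fun p => p.1) (fun p => p.2) false)
  have hs2pw : s2.Pairwise (fun a b => b.1 < a.1 ∨ (b.1 = a.1 ∧ b.2 ≤ a.2)) := by
    rw [hs2, List.pairwise_reverse]
    exact pv_sorted2_pairwise' SA
  have hbnd : ∀ p ∈ s2, 0 ≤ p.1 ∧ p.1 < (b.length : Int) := by
    intro p hp
    have hb := pv_SA_bounds m n b p (hperm.mem_iff.mp hp)
    have hbl : b.length = n.toNat := hR.1
    constructor
    · exact hb.1
    · have := hb.2.1; omega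
  rw [pv_fold_remove' s2 b cnt hbnd]
  refine ⟨?_, ⟨?_, ?_, ?_⟩, pv_shape_gravity m n g hit⟩
  · -- counts
    show cnt + (s2.length : Int) = cnt + PySem.Set.len hit
    have h1 : s2.length = SA.length := hperm.length_eq
    have h2 : SA.length = hit.length := pv_len_corr' m n b g hR
    show cnt + (s2.length : Int) = cnt + (hit.length : Int)
    omega
  · simp [List.length_mapIdx, hR.1]
  · -- row lengths
    intro row hrow
    obtain ⟨k, hk, heq⟩ := List.mem_iff_getElem.mp hrow
    rw [List.length_mapIdx] at hk
    rw [List.getElem_mapIdx] at heq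
    rw [← heq, pv_row_eq m n b g hR s2 hperm hs2pw k hk]
    rw [List.length_reverse, pv_col_length]
  · -- cells
    intro i j hi0 hi hj0 hj
    have hbl : b.length = n.toNat := hR.1
    have hiN : i.toNat < b.length := by omega
    have hM : (pvCol m g hit (i.toNat : Int)).length = m.toNat := pv_col_length m g hit _
    unfold pvCell
    rw [PySem.List.pyGet?_of_nonneg _ hi0,
      List.getElem?_eq_getElem (by simpa [List.length_mapIdx] using hiN)]
    rw [List.getElem_mapIdx]
    rw [pv_row_eq m n b g hR s2 hperm hs2pw i.toNat hiN]
    simp only [Option.bind_some]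
    rw [PySem.List.pyGet?_of_nonneg _ hj0]
    rw [List.getElem?_reverse (by rw [hM]; omega)]
    rw [hM]
    have hfold : pvCell (pvGravityB m n g hit) (m-1-j) i
        = ((PySem.List.pyGet? (pvGravityB m n g hit) (m - 1 - j)).bind
            fun row => PySem.List.pyGet? row i).getD ' ' := rfl
    rw [← hfold, pv_cell_gravity m n g hit (m-1-j) i (by omega) (by omega) hi0 hi]
    rw [show ((i.toNat : Int)) = i by omega]
    rw [show m.toNat - 1 - j.toNat = (m-1-j).toNat by omega]

lemma pv_loop_eq' (fuel : Nat) :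
    ∀ (m n : Int) (b g : List (List Char)) (cnt : Int),
    pvShape m n g → pvRel m n b g →
    pvLoopA fuel m n b cnt = pvLoopB fuel m n g cnt := by
  induction fuel with
  | zero => intro m n b g cnt _ _; rfl
  | succ f ih =>
    intro m n b g cnt hS hR
    show (let s := checkblockA m n b; _) = (let hit := pvHitsB m n g; _)
    simp only [pvLoopA, pvLoopB]
    have hlen := pv_len_corr' m n b g hR
    have hemp : (checkblockA m n b).isEmpty = (pvHitsB m n g).isEmpty := by
      cases hA : (checkblockA m n b).isEmpty with
      | true =>
        rw [List.isEmpty_iff_length_eq_zero] at hA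
        symm
        rw [List.isEmpty_iff_length_eq_zero]
        omega
      | false =>
        symm
        rw [Bool.eq_false_iff] at hA ⊢
        intro hc
        rw [List.isEmpty_iff_length_eq_zero] at hc
        exact hA (by rw [List.isEmpty_iff_length_eq_zero]; omega)
    rw [hemp]
    cases hB : (pvHitsB m n g).isEmpty with
    | true => simp
    | false =>
      simp only [Bool.false_eq_true, if_false]
      obtain ⟨hcnt, hrel, hshape⟩ := pv_step m n b g cnt hS hR
      rw [hcnt] at *
      calc _ = pvLoopB f m n (pvGravityB m n g (pvHitsB m n g)) (cnt + PySem.Set.len (pvHitsB m n g)) := by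
            rw [← hcnt]
            exact ih m n _ _ _ hshape hrel
        _ = _ := rfl
lemma pv_init' (m n : Int) (board : List String)
    (hm : (board.length : Int) = m) (hn : ∀ s ∈ board, PySem.Str.len s = n) :
    pvShape m n (board.map String.toList) ∧
    pvRel m n
      ((PySem.List.pyRange 0 n 1).map (fun i =>
        (PySem.List.pyRange 1 (m+1) 1).map (fun j =>
          ((PySem.List.pyGet? board (-j)).bind (fun s => PySem.Str.pyGet? s i)).getD ' ')))
      (board.map String.toList) := by
  have hrowlen : ∀ s ∈ board, s.toList.length = n.toNat := by
    intro s hs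
    have := hn s hs
    rw [PySem.Str.len_eq] at this
    omega
  have hshape : pvShape m n (board.map String.toList) := by
    constructor
    · rw [List.length_map]; omega
    · intro row hrow
      obtain ⟨s, hs, rfl⟩ := List.mem_map.mp hrow
      exact hrowlen s hs
  refine ⟨hshape, ?_, ?_, ?_⟩
  · rw [List.length_map, PySem.List.length_pyRange_one]; omega
  · intro row hrow
    obtain ⟨i, _, rfl⟩ := List.mem_map.mp hrow
    rw [List.length_map, PySem.List.length_pyRange_one]; omega
  · intro i j hi0 hi hj0 hj
    have hbl : board.length = m.toNat := by omega
    set jn := j.toNat with hjn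
    set M := m.toNat with hM
    have hjnM : jn < M := by omega
    -- left side
    rw [pv_cell_grid _ n i j hi0 hi]
    rw [PySem.List.pyGet?_of_nonneg _ hj0]
    have hlen1 : (PySem.List.pyRange 1 (m+1) 1).length = M := by
      rw [PySem.List.length_pyRange_one]; omega
    rw [List.getElem?_eq_getElem (by rw [List.length_map, hlen1]; omega)]
    rw [List.getElem_map, PySem.List.getElem_pyRange_one 1 (m+1) jn (by rw [hlen1]; omega)]
    rw [show -(1 + (jn : Int)) = -(((jn + 1 : Nat)) : Int) by omega]
    rw [PySem.List.pyGet?_neg_natCast board (jn + 1) (by omega) (by omega)]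
    rw [List.getElem?_eq_getElem (by omega : board.length - (jn + 1) < board.length)]
    simp only [Option.bind_some]
    rw [show i = ((i.toNat : Nat) : Int) by omega, PySem.Str.pyGet?_natCast]
    have hsl : (board[board.length - (jn + 1)]).toList.length = n.toNat :=
      hrowlen _ (List.getElem_mem _)
    rw [List.getElem?_eq_getElem (by omega : i.toNat < (board[board.length - (jn + 1)]).toList.length)]
    -- right side
    unfold pvCell
    rw [PySem.List.pyGet?_of_nonneg _ (by omega : (0:Int) ≤ m - 1 - j)]
    rw [List.getElem?_eq_getElem (by rw [List.length_map]; omega :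
      (m - 1 - j).toNat < (board.map String.toList).length)]
    rw [List.getElem_map]
    simp only [Option.bind_some]
    rw [PySem.List.pyGet?_natCast]
    have hsl2 : (board[(m - 1 - j).toNat]).toList.length = n.toNat :=
      hrowlen _ (List.getElem_mem _)
    rw [List.getElem?_eq_getElem (by omega : i.toNat < (board[(m - 1 - j).toNat]).toList.length)]
    simp only [Option.getD_some]
    have hidx : board.length - (jn + 1) = (m - 1 - j).toNat := by omega
    congr 1
    simp only [hidx]

lemma pv_checkblockA_trivial (m n : Int) (b : List (List Char)) (h : n ≤ 1 ∨ m ≤ 1) :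
    checkblockA m n b = [] := by
  apply List.eq_nil_iff_forall_not_mem.mpr
  intro p hp
  rw [pv_mem_checkblockA'] at hp
  obtain ⟨i, j, hi0, hi, hj0, hj, -, -⟩ := hp
  omega

lemma pv_trivial_eq (m n : Int) (board : List String) (h : n ≤ 1 ∨ m ≤ 1) :
    solution m n board = solution_alt m n board := by
  unfold solution solution_alt
  rw [if_pos (by rcases h with h | h <;> simp <;> omega)]
  simp only [pvLoopA]
  rw [pv_checkblockA_trivial m n _ h]
  simp

-- ===== VERDICT (by name: the statement is the Claim_ definition above) =====
theorem solution_spec : Claim_equal_solution := by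
  intro m n board _ hPre
  show solution m n board = solution_alt m n board
  by_cases hd : n ≤ 1 ∨ m ≤ 1
  · exact pv_trivial_eq m n board hd
  · push_neg at hd
    rcases hPre with hn | hm | ⟨hm, hn⟩
    · omega
    · omega
    · obtain ⟨hS, hR⟩ := pv_init' m n board hm hn
      unfold solution solution_alt
      rw [if_neg (by simp; omega)]
      exact pv_loop_eq' _ m n _ _ 0 hS hR
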